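-- pv_equiv track=rewrite | github.com/peter-as/advent-of-code | 2024/12.py | count
-- ===== SOURCE A (Python) =====
-- def count(side: set[tuple[int, int]], current: tuple[int, int], direction: chr, visited: set[tuple[int, int]]) -> set[tuple[int, int]]:
--     """
--     Traverses a set of edges all facing the same side from one edge, to find every edge that are part of the starting edge's border
--
--     Args:
--         side: A set of edges all on the same side of the garden
--         current: The current edge
--         direction: The direction the edge is laid - '-' or '|'
--         visited: the set of tuples of coordinates of the visited edges
--
--     Returns:
--         The set of visited edges
--     """
--     visited.add(current)
--     i, j = current[0], current[1]
--     if direction == '-':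
--         if (i, j-1) not in visited and (i, j-1) in side:
--             visited.add((i, j-1))
--             visited.union(count(side, (i, j-1), '-', visited))
--         if (i, j+1) not in visited and (i, j+1) in side:
--             visited.add((i, j+1))
--             visited.union(count(side, (i, j+1), '-', visited))
--     else:
--         if (i-1, j) not in visited and (i-1, j) in side:
--             visited.add((i-1, j))
--             visited.union(count(side, (i-1, j), '|', visited))
--         if (i+1, j) not in visited and (i+1, j) in side:
--             visited.add((i+1, j))
--             visited.union(count(side, (i+1, j), '|', visited))
--     return visited
-- ===== SOURCE B (Python) =====
-- def count(side: set[tuple[int, int]], current: tuple[int, int], direction: chr, visited: set[tuple[int, int]]) -> set[tuple[int, int]]: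
--     """Iterative re-implementation: the same-direction neighbour graph is a line,
--     so instead of recursing, walk outwards from `current` in both directions,
--     adding edges to `visited` while they stay inside `side` and unvisited.
--     Mutates `visited` in place, like the original."""
--     visited.add(current)
--     i, j = current
--     if direction == '-':
--         steps = ((0, -1), (0, 1))
--     else:
--         steps = ((-1, 0), (1, 0))
--     for di, dj in steps:
--         x, y = i + di, j + dj
--         while (x, y) in side and (x, y) not in visited:
--             visited.add((x, y))
--             x, y = x + di, y + dj
--     return visited
-- ===== Notes on version B (the rewrite author's own statement) =====
-- stated objective: simpler
-- what changed: Replaces the recursive DFS with two plain while-loop walks: since neighbours only vary one coordinate, the explored component is a line, so B walks left/down then right/up from the start, with no recursion or stack.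
import Mathlib
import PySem

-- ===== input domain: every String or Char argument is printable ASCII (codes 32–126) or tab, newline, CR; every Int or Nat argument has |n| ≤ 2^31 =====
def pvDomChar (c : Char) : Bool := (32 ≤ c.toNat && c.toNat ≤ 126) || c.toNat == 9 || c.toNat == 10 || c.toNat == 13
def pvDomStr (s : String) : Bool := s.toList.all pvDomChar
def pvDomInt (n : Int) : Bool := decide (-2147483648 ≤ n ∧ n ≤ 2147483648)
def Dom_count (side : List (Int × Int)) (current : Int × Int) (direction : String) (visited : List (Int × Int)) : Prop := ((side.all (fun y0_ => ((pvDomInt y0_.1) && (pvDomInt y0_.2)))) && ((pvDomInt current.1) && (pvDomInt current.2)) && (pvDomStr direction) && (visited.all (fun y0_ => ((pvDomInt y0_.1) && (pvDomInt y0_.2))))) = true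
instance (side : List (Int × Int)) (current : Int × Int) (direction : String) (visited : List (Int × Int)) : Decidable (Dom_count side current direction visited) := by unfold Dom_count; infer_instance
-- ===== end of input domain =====

-- B replaces A's recursive DFS by two plain directional walks (the explored component is a
-- line); same returned set in the same insertion order. Both Pythons mutate `visited` in
-- place identically; the theorems here are about the returned value.

-- ===== PORT A =====
-- Literal port of A's recursive DFS. The Nat argument is a fuel guard only (Python's
-- recursion always terminates); `count` supplies `side.length + 1`, which the proofs show
-- is always sufficient.
def countFuel : Nat → List (Int × Int) → (Int × Int) → String → List (Int × Int) → List (Int × Int)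
  | 0, _, _, _, visited => visited
  | f + 1, side, current, direction, visited =>
    let v1 := PySem.Set.add visited current
    let i := current.1
    let j := current.2
    if direction = "-" then
      let v2 := if (i, j - 1) ∉ v1 ∧ (i, j - 1) ∈ side then
          countFuel f side (i, j - 1) "-" (PySem.Set.add v1 (i, j - 1)) else v1
      let v3 := if (i, j + 1) ∉ v2 ∧ (i, j + 1) ∈ side then
          countFuel f side (i, j + 1) "-" (PySem.Set.add v2 (i, j + 1)) else v2
      v3
    else
      let v2 := if (i - 1, j) ∉ v1 ∧ (i - 1, j) ∈ side then
          countFuel f side (i - 1, j) "|" (PySem.Set.add v1 (i - 1, j)) else v1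
      let v3 := if (i + 1, j) ∉ v2 ∧ (i + 1, j) ∈ side then
          countFuel f side (i + 1, j) "|" (PySem.Set.add v2 (i + 1, j)) else v2
      v3

def count (side : List (Int × Int)) (current : Int × Int) (direction : String) (visited : List (Int × Int)) : List (Int × Int) :=
  countFuel (side.length + 1) side current direction visited

-- ===== PORT B =====
-- Termination measure fact for B's while loop (cited by `walk`'s decreasing_by, and reused
-- by the proofs): marking an unvisited member of `side` visited strictly shrinks the
-- number of unvisited members of `side`.
theorem pvFilterLtAux {α : Type} {p q : α → Bool} (himp : ∀ a, q a = true → p a = true)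
    {n : α} (hp : p n = true) (hq : q n = false) :
    ∀ side : List α, n ∈ side → (side.filter q).length < (side.filter p).length := by
  intro side hside
  induction side with
  | nil => cases hside
  | cons x xs ih =>
    have hmono : (xs.filter q).length ≤ (xs.filter p).length :=
      List.Sublist.length_le (List.monotone_filter_right _ himp)
    rw [List.filter_cons, List.filter_cons]
    by_cases hx : x = n
    · subst hx
      simp [hp, hq]
      omega
    · have hxs : n ∈ xs := by
        rcases List.mem_cons.mp hside with h | h
        · exact absurd h.symm hx
        · exact h
      have hlt := ih hxs
      by_cases hqx : q x = true
      · have hpx := himp x hqx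
        simp [hqx, hpx]
        omega
      · by_cases hpx : p x = true
        · simp [hqx, hpx]
          omega
        · simp [hqx, hpx]
          omega

theorem pvFilterLt {v w : List (Int × Int)} (n : Int × Int)
    (hsub : ∀ a, a ∈ v → a ∈ w) (hnv : n ∉ v) (hnw : n ∈ w) :
    ∀ side : List (Int × Int), n ∈ side →
    (side.filter (fun a => a ∉ w)).length < (side.filter (fun a => a ∉ v)).length := by
  apply pvFilterLtAux
  · intro a ha
    simp at ha ⊢
    intro hv; exact ha (hsub a hv)
  · simpa using hnv
  · simpa using hnw

-- B's while loop: walk in direction (di, dj) from (x, y), adding edges while they are in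
-- `side` and unvisited.
def walk (side : List (Int × Int)) (di dj : Int) (x y : Int) (visited : List (Int × Int)) : List (Int × Int) :=
  if h : (x, y) ∈ side ∧ (x, y) ∉ visited then
    walk side di dj (x + di) (y + dj) (PySem.Set.add visited (x, y))
  else visited
termination_by (side.filter (fun a => a ∉ visited)).length
decreasing_by
  exact pvFilterLt (x, y) (fun a ha => ((PySem.Set.mem_add visited (x, y) a).mpr (Or.inl ha)))
    h.2 ((PySem.Set.mem_add visited (x, y) (x, y)).mpr (Or.inr rfl)) side h.1

def count_alt (side : List (Int × Int)) (current : Int × Int) (direction : String) (visited : List (Int × Int)) : List (Int × Int) :=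
  let v := PySem.Set.add visited current
  let steps : List (Int × Int) := if direction = "-" then [(0, -1), (0, 1)] else [(-1, 0), (1, 0)]
  steps.foldl (fun v d => walk side d.1 d.2 (current.1 + d.1) (current.2 + d.2) v) v

-- ===== PRECONDITION & SPEC =====
def Spec_count (side : List (Int × Int)) (current : Int × Int) (direction : String) (visited : List (Int × Int)) (out : List (Int × Int)) : Prop := out = count_alt side current direction visited
instance (side : List (Int × Int)) (current : Int × Int) (direction : String) (visited : List (Int × Int)) (out : List (Int × Int)) : Decidable (Spec_count side current direction visited out) := by unfold Spec_count; infer_instance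

-- ===== CLAIM (what is proved, stated in full; the proofs are below) =====
def Claim_equal_count : Prop := ∀ (side : List (Int × Int)) (current : Int × Int) (direction : String) (visited : List (Int × Int)), Dom_count side current direction visited → Spec_count side current direction visited (count side current direction visited)

-- ===== LEMMAS AND PROOFS =====

theorem walk_stop {side : List (Int × Int)} {di dj x y : Int} {v : List (Int × Int)}
    (h : ¬((x, y) ∈ side ∧ (x, y) ∉ v)) : walk side di dj x y v = v := by
  rw [walk]; simp [h]

theorem walk_step {side : List (Int × Int)} {di dj x y : Int} {v : List (Int × Int)}
    (h : (x, y) ∈ side ∧ (x, y) ∉ v) :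
    walk side di dj x y v = walk side di dj (x + di) (y + dj) (PySem.Set.add v (x, y)) := by
  rw [walk]; simp [h]

theorem walk_mono {side : List (Int × Int)} (di dj : Int) :
    ∀ (x y : Int) (v : List (Int × Int)) (a : Int × Int), a ∈ v → a ∈ walk side di dj x y v := by
  intro x y v
  fun_induction walk side di dj x y v with
  | case1 x y v _h ih =>
    intro a ha
    exact ih a ((PySem.Set.mem_add v (x, y) a).mpr (Or.inl ha))
  | case2 x y v _h =>
    intro a ha; exact ha

theorem mem_add_left {v : List (Int × Int)} {a n : Int × Int} (h : a ∈ v) :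
    a ∈ PySem.Set.add v n := (PySem.Set.mem_add v n a).mpr (Or.inl h)

theorem mem_add_self (v : List (Int × Int)) (n : Int × Int) :
    n ∈ PySem.Set.add v n := (PySem.Set.mem_add v n n).mpr (Or.inr rfl)

-- Characterisation of A's DFS in the horizontal case: it is exactly B's two walks.
theorem countFuel_minus (side : List (Int × Int)) :
    ∀ (f : Nat) (v : List (Int × Int)) (i j : Int),
    (side.filter (fun a => a ∉ v)).length < f →
    countFuel f side (i, j) "-" v =
      walk side 0 1 i (j + 1) (walk side 0 (-1) i (j - 1) (PySem.Set.add v (i, j))) := by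
  intro f
  induction f with
  | zero => intro v i j h; omega
  | succ f ih =>
    intro v i j hf
    simp only [countFuel]
    rw [if_pos trivial]
    set v1 := PySem.Set.add v (i, j) with hv1
    have hij_v1 : (i, j) ∈ v1 := mem_add_self v (i, j)
    have hsubv1 : ∀ a, a ∈ v → a ∈ v1 := fun a ha => mem_add_left ha
    -- left walk
    have hleft : (if (i, j - 1) ∉ v1 ∧ (i, j - 1) ∈ side then
        countFuel f side (i, j - 1) "-" (PySem.Set.add v1 (i, j - 1)) else v1)
        = walk side 0 (-1) i (j - 1) v1 := by
      by_cases h1 : (i, j - 1) ∉ v1 ∧ (i, j - 1) ∈ side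
      · rw [if_pos h1]
        have hnv : (i, j - 1) ∉ v := fun hc => h1.1 (hsubv1 _ hc)
        have hfuel : (side.filter (fun a => a ∉ PySem.Set.add v1 (i, j - 1))).length < f := by
          have := pvFilterLt (i, j - 1)
            (fun a ha => mem_add_left (hsubv1 a ha)) hnv
            (mem_add_self v1 (i, j - 1)) side h1.2
          omega
        rw [ih (PySem.Set.add v1 (i, j - 1)) i (j - 1) hfuel]
        rw [PySem.Set.add_of_mem (mem_add_self v1 (i, j - 1))]
        rw [show j - 1 + 1 = j from by ring]
        have hin : (i, j) ∈ walk side 0 (-1) i (j - 1 - 1) (PySem.Set.add v1 (i, j - 1)) :=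
          walk_mono 0 (-1) _ _ _ _ (mem_add_left hij_v1)
        rw [walk_stop (by simp [hin])]
        rw [walk_step ⟨h1.2, h1.1⟩]
        rw [show j - 1 + (-1) = j - 1 - 1 from by ring]
        simp
      · rw [if_neg h1]
        rw [walk_stop (by tauto)]
    rw [hleft]
    set v2 := walk side 0 (-1) i (j - 1) v1 with hv2
    have hsubv2 : ∀ a, a ∈ v → a ∈ v2 := fun a ha =>
      walk_mono 0 (-1) _ _ _ _ (hsubv1 a ha)
    have hij_v2 : (i, j) ∈ v2 := walk_mono 0 (-1) _ _ _ _ hij_v1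
    -- right walk
    by_cases h2 : (i, j + 1) ∉ v2 ∧ (i, j + 1) ∈ side
    · rw [if_pos h2]
      have hnv : (i, j + 1) ∉ v := fun hc => h2.1 (hsubv2 _ hc)
      have hfuel : (side.filter (fun a => a ∉ PySem.Set.add v2 (i, j + 1))).length < f := by
        have := pvFilterLt (i, j + 1)
          (fun a ha => mem_add_left (hsubv2 a ha)) hnv
          (mem_add_self v2 (i, j + 1)) side h2.2
        omega
      rw [ih (PySem.Set.add v2 (i, j + 1)) i (j + 1) hfuel]
      rw [PySem.Set.add_of_mem (mem_add_self v2 (i, j + 1))]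
      rw [show j + 1 - 1 = j from by ring]
      rw [walk_stop (show ¬((i, j) ∈ side ∧ (i, j) ∉ PySem.Set.add v2 (i, j + 1)) from by
        simp [mem_add_left hij_v2])]
      rw [walk_step ⟨h2.2, h2.1⟩]
      rw [show i + (0:Int) = i from by ring]
    · rw [if_neg h2]
      rw [walk_stop (by tauto)]

-- Characterisation of A's DFS in the vertical case (any direction ≠ "-"; the recursion
-- itself continues with "|", which also satisfies the hypothesis).
theorem countFuel_pipe (side : List (Int × Int)) :
    ∀ (f : Nat) (d : String), d ≠ "-" → ∀ (v : List (Int × Int)) (i j : Int),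
    (side.filter (fun a => a ∉ v)).length < f →
    countFuel f side (i, j) d v =
      walk side 1 0 (i + 1) j (walk side (-1) 0 (i - 1) j (PySem.Set.add v (i, j))) := by
  intro f
  induction f with
  | zero => intro d hd v i j h; omega
  | succ f ih =>
    intro d hd v i j hf
    simp only [countFuel]
    rw [if_neg hd]
    set v1 := PySem.Set.add v (i, j) with hv1
    have hij_v1 : (i, j) ∈ v1 := mem_add_self v (i, j)
    have hsubv1 : ∀ a, a ∈ v → a ∈ v1 := fun a ha => mem_add_left ha
    have hleft : (if (i - 1, j) ∉ v1 ∧ (i - 1, j) ∈ side then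
        countFuel f side (i - 1, j) "|" (PySem.Set.add v1 (i - 1, j)) else v1)
        = walk side (-1) 0 (i - 1) j v1 := by
      by_cases h1 : (i - 1, j) ∉ v1 ∧ (i - 1, j) ∈ side
      · rw [if_pos h1]
        have hnv : (i - 1, j) ∉ v := fun hc => h1.1 (hsubv1 _ hc)
        have hfuel : (side.filter (fun a => a ∉ PySem.Set.add v1 (i - 1, j))).length < f := by
          have := pvFilterLt (i - 1, j)
            (fun a ha => mem_add_left (hsubv1 a ha)) hnv
            (mem_add_self v1 (i - 1, j)) side h1.2
          omega
        rw [ih "|" (by decide) (PySem.Set.add v1 (i - 1, j)) (i - 1) j hfuel]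
        rw [PySem.Set.add_of_mem (mem_add_self v1 (i - 1, j))]
        rw [show i - 1 + 1 = i from by ring]
        have hin : (i, j) ∈ walk side (-1) 0 (i - 1 - 1) j (PySem.Set.add v1 (i - 1, j)) :=
          walk_mono (-1) 0 _ _ _ _ (mem_add_left hij_v1)
        rw [walk_stop (by simp [hin])]
        rw [walk_step ⟨h1.2, h1.1⟩]
        rw [show i - 1 + (-1) = i - 1 - 1 from by ring]
        simp
      · rw [if_neg h1]
        rw [walk_stop (by tauto)]
    rw [hleft]
    set v2 := walk side (-1) 0 (i - 1) j v1 with hv2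
    have hsubv2 : ∀ a, a ∈ v → a ∈ v2 := fun a ha =>
      walk_mono (-1) 0 _ _ _ _ (hsubv1 a ha)
    have hij_v2 : (i, j) ∈ v2 := walk_mono (-1) 0 _ _ _ _ hij_v1
    by_cases h2 : (i + 1, j) ∉ v2 ∧ (i + 1, j) ∈ side
    · rw [if_pos h2]
      have hnv : (i + 1, j) ∉ v := fun hc => h2.1 (hsubv2 _ hc)
      have hfuel : (side.filter (fun a => a ∉ PySem.Set.add v2 (i + 1, j))).length < f := by
        have := pvFilterLt (i + 1, j)
          (fun a ha => mem_add_left (hsubv2 a ha)) hnv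
          (mem_add_self v2 (i + 1, j)) side h2.2
        omega
      rw [ih "|" (by decide) (PySem.Set.add v2 (i + 1, j)) (i + 1) j hfuel]
      rw [PySem.Set.add_of_mem (mem_add_self v2 (i + 1, j))]
      rw [show i + 1 - 1 = i from by ring]
      rw [walk_stop (show ¬((i, j) ∈ side ∧ (i, j) ∉ PySem.Set.add v2 (i + 1, j)) from by
        simp [mem_add_left hij_v2])]
      rw [walk_step ⟨h2.2, h2.1⟩]
      rw [show j + (0:Int) = j from by ring]
    · rw [if_neg h2]
      rw [walk_stop (by tauto)]

-- ===== VERDICT (by name: the statement is the Claim_ definition above) =====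
theorem count_spec : Claim_equal_count := by
  intro side current direction visited _
  obtain ⟨i, j⟩ := current
  show count side (i, j) direction visited = count_alt side (i, j) direction visited
  have hfuel : (side.filter (fun a => a ∉ visited)).length < side.length + 1 := by
    have := List.length_filter_le (fun a => a ∉ visited) side
    omega
  by_cases hd : direction = "-"
  · subst hd
    unfold count count_alt
    rw [countFuel_minus side (side.length + 1) visited i j hfuel]
    simp [List.foldl, ← sub_eq_add_neg]
  · unfold count count_alt
    rw [countFuel_pipe side (side.length + 1) direction hd visited i j hfuel]
    simp [hd, List.foldl, ← sub_eq_add_neg]
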